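-- pv_equiv track=rewrite | github.com/compas-dev/compas | src/compas/datastructures/graph/duality.py | _break_cycles
-- ===== SOURCE A (Python) =====
-- def _break_cycles(cycles, breakpoints):
--     breakpoints = set(breakpoints)
--     broken = []
--
--     for fkey in cycles:
--         vertices = cycles[fkey]
--
--         faces = []
--         faces.append([vertices[0]])
--         for i in range(1, len(vertices) - 1):
--             key = vertices[i]
--             faces[-1].append(key)
--             if key in breakpoints:
--                 faces.append([key])
--
--         faces[-1].append(vertices[-1])
--         faces[-1].append(vertices[0])
--
--         if len(faces) == 1:
--             broken.append(faces[0])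
--             continue
--
--         if faces[0][0] not in breakpoints and faces[-1][-1] not in breakpoints:
--             if faces[0][0] == faces[-1][-1]:
--                 faces[:] = [faces[-1] + faces[0][1:]] + faces[1:-1]
--
--         if len(faces) == 1:
--             broken.append(faces[0])
--             continue
--
--         for vertices in faces:
--             broken.append(vertices)
--
--     return broken
-- ===== SOURCE B (Python) =====
-- def _break_cycles(cycles, breakpoints):
--     bset = set(breakpoints)
--     broken = []
--     for vertices in cycles.values():
--         # closed walk: first vertex, interior vertices, last vertex, first vertex again
--         seq = [vertices[0]] + vertices[1:-1] + [vertices[-1], vertices[0]]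
--         # interior positions at which the walk is cut (faces share the cut vertex)
--         cuts = [0] + [i for i in range(1, len(vertices) - 1) if vertices[i] in bset] + [len(seq) - 1]
--         faces = [seq[a:b + 1] for a, b in zip(cuts, cuts[1:])]
--         if len(faces) > 1 and vertices[0] not in bset:
--             faces = [faces[-1] + faces[0][1:]] + faces[1:-1]
--         broken.extend(faces)
--     return broken
-- ===== Notes on version B (the rewrite author's own statement) =====
-- stated objective: alternative
-- what changed: B precomputes the table of interior breakpoint positions, cuts every face out of the closed walk with one slice per consecutive cut pair (instead of growing the last face element by element and opening a new face on each breakpoint), and collapses A's wrap-around merge test (whose faces[0][0] == faces[-1][-1] comparison is always true) into a single 'more than one face and first vertex not a breakpoint' guard.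
-- outside the precondition, e.g. on _break_cycles({1: []}, []): A raises IndexError, B raises IndexError
import Mathlib
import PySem

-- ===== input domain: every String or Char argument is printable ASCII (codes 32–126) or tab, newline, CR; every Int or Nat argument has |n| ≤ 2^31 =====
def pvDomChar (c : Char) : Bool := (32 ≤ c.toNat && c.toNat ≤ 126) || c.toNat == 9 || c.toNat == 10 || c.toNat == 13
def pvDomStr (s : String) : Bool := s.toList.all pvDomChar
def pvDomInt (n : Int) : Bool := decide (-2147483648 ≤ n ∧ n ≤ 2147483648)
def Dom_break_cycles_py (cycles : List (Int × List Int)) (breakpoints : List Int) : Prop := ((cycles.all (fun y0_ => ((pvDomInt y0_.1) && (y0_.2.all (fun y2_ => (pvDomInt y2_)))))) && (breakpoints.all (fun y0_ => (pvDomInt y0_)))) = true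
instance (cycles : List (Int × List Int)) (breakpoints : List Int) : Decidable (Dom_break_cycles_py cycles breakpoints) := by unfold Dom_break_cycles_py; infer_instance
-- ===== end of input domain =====

-- B builds each face in one slice from a precomputed table of cut positions (and folds A's always-true
-- wrap-around test into one guard) instead of growing faces element by element; objective: alternative.

-- B builds each face in one slice from a precomputed table of cut positions (and folds A's always-true
-- wrap-around test into one guard) instead of growing each face element by element; objective: alternative.

-- ===== PORT A =====
-- body of A's inner 'for i in range(1, len(vertices) - 1)' loop
def pvStepA (vertices : List Int) (bset : PySem.Set Int) (faces : List (List Int)) (i : Int) : List (List Int) :=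
  let key := PySem.List.pyGetD vertices i 0
  let faces := faces.dropLast ++ [faces.getLastD [] ++ [key]]
  if PySem.Set.contains bset key then faces ++ [[key]] else faces

-- one iteration of A's outer 'for fkey in cycles' loop (the body appends to 'broken')
def pvCycleA (broken : List (List Int)) (vertices : List Int) (bset : PySem.Set Int) : List (List Int) :=
  match PySem.List.pyGet? vertices 0 with
  | none => broken
  | some v0 =>
    let faces : List (List Int) := [[v0]]
    let faces := (PySem.List.pyRange 1 ((vertices.length : Int) - 1) 1).foldl (pvStepA vertices bset) faces
    let faces := faces.dropLast ++ [faces.getLastD [] ++ [PySem.List.pyGetD vertices (-1) 0]]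
    let faces := faces.dropLast ++ [faces.getLastD [] ++ [v0]]
    if faces.length == 1 then broken ++ [PySem.List.pyGetD faces 0 []]
    else
      let faces :=
        if !(PySem.Set.contains bset (PySem.List.pyGetD (PySem.List.pyGetD faces 0 []) 0 0)) &&
           !(PySem.Set.contains bset (PySem.List.pyGetD (PySem.List.pyGetD faces (-1) []) (-1) 0)) then
          if PySem.List.pyGetD (PySem.List.pyGetD faces 0 []) 0 0 == PySem.List.pyGetD (PySem.List.pyGetD faces (-1) []) (-1) 0 then
            [PySem.List.pyGetD faces (-1) [] ++ PySem.List.slice (PySem.List.pyGetD faces 0 []) (some 1) none] ++ PySem.List.slice faces (some 1) (some (-1))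
          else faces
        else faces
      if faces.length == 1 then broken ++ [PySem.List.pyGetD faces 0 []]
      else faces.foldl (fun b f => b ++ [f]) broken

def break_cycles_py (cycles : List (Int × List Int)) (breakpoints : List Int) : List (List Int) :=
  let bset := PySem.Set.ofList breakpoints
  -- 'for fkey in cycles: vertices = cycles[fkey]' iterates the dict's items (keys are unique)
  ((PySem.Dict.ofList cycles).items).foldl (fun broken p => pvCycleA broken p.2 bset) []

-- ===== PORT B =====
-- one iteration of B's loop: the faces of one cycle, each cut from the closed walk by a single slice
def pvCycleB (vertices : List Int) (bset : PySem.Set Int) : List (List Int) :=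
  match PySem.List.pyGet? vertices 0 with
  | none => []
  | some v0 =>
    let seq := [v0] ++ PySem.List.slice vertices (some 1) (some (-1)) ++ [PySem.List.pyGetD vertices (-1) 0, v0]
    let cuts : List Int := [0] ++ (PySem.List.pyRange 1 ((vertices.length : Int) - 1) 1).filter
        (fun i => PySem.Set.contains bset (PySem.List.pyGetD vertices i 0)) ++ [(seq.length : Int) - 1]
    let faces := (cuts.zip cuts.tail).map (fun p => PySem.List.slice seq (some p.1) (some (p.2 + 1)))
    if decide (1 < faces.length) && !(PySem.Set.contains bset v0) then
      [PySem.List.pyGetD faces (-1) [] ++ PySem.List.slice (PySem.List.pyGetD faces 0 []) (some 1) none] ++ PySem.List.slice faces (some 1) (some (-1))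
    else faces

def break_cycles_py_alt (cycles : List (Int × List Int)) (breakpoints : List Int) : List (List Int) :=
  let bset := PySem.Set.ofList breakpoints
  ((PySem.Dict.ofList cycles).items).foldl (fun broken p => broken ++ pvCycleB p.2 bset) []

-- ===== PRECONDITION & SPEC =====
-- Pre_ excludes exactly the inputs whose dict carries an empty vertex list: there 'vertices[0]' raises IndexError.
def Pre_break_cycles_py (cycles : List (Int × List Int)) (breakpoints : List Int) : Prop :=
  ∀ v ∈ (PySem.Dict.ofList cycles).values, v ≠ []
instance (cycles : List (Int × List Int)) (breakpoints : List Int) : Decidable (Pre_break_cycles_py cycles breakpoints) := by unfold Pre_break_cycles_py; infer_instance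
def pvWitness_break_cycles_py : (List (Int × List Int)) × List Int := ([(0, [1, 2, 3, 4]), (1, [5])], [3])
def Spec_break_cycles_py (cycles : List (Int × List Int)) (breakpoints : List Int) (out : List (List Int)) : Prop := out = break_cycles_py_alt cycles breakpoints
instance (cycles : List (Int × List Int)) (breakpoints : List Int) (out : List (List Int)) : Decidable (Spec_break_cycles_py cycles breakpoints out) := by unfold Spec_break_cycles_py; infer_instance

-- ===== CLAIM (what is proved, stated in full; the proofs are below) =====
def Claim_equal_break_cycles_py : Prop := ∀ (cycles : List (Int × List Int)) (breakpoints : List Int), Dom_break_cycles_py cycles breakpoints → Pre_break_cycles_py cycles breakpoints → Spec_break_cycles_py cycles breakpoints (break_cycles_py cycles breakpoints)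

-- ===== LEMMAS AND PROOFS =====
def sliceI (seq : List Int) (a b : Int) : List Int := PySem.List.slice seq (some a) (some (b + 1))

def mkFaces (seq : List Int) : List Int → Int → List (List Int)
  | [], _ => []
  | [c], e => [sliceI seq c e]
  | c :: c' :: cs, e => sliceI seq c c' :: mkFaces seq (c' :: cs) e

def lastCut : List Int → Int
  | [] => 0
  | [c] => c
  | _ :: c' :: cs => lastCut (c' :: cs)

theorem mkFaces_ne_nil (seq : List Int) (c : Int) (cs : List Int) (e : Int) : mkFaces seq (c :: cs) e ≠ [] := by
  cases cs <;> simp [mkFaces]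

theorem getLastD_irrel {α : Type} (l : List α) (x y : α) (h : l ≠ []) : l.getLastD x = l.getLastD y := by
  cases l with
  | nil => exact absurd rfl h
  | cons a t => rfl

theorem lastCut_mem : ∀ (cs : List Int) (c : Int), lastCut (c :: cs) ∈ c :: cs := by
  intro cs
  induction cs with
  | nil => intro c; simp [lastCut]
  | cons c2 cs' ih => intro c; simp only [lastCut]; exact List.mem_cons_of_mem c (ih c2)

theorem zip_map_eq_mkFaces (seq : List Int) : ∀ (cs : List Int) (c e : Int),
    ((((c :: cs) ++ [e]).zip ((c :: cs) ++ [e]).tail).map (fun p => PySem.List.slice seq (some p.1) (some (p.2 + 1)))) = mkFaces seq (c :: cs) e := by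
  intro cs
  induction cs with
  | nil => intro c e; simp [mkFaces, sliceI]
  | cons c2 cs' ih =>
    intro c e
    simp only [List.cons_append, List.tail_cons, List.zip_cons_cons, List.map_cons, mkFaces]
    refine congrArg₂ List.cons rfl ?_
    simpa using ih c2 e

theorem mkFaces_snoc (seq : List Int) : ∀ (cs : List Int) (c c' e : Int),
    mkFaces seq ((c :: cs) ++ [c']) e = mkFaces seq (c :: cs) c' ++ [sliceI seq c' e] := by
  intro cs
  induction cs with
  | nil => intro c c' e; simp [mkFaces]
  | cons c2 cs' ih =>
    intro c c' e
    simp only [List.cons_append, mkFaces]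
    rw [← List.cons_append, ih]

theorem mkFaces_getLastD (seq : List Int) : ∀ (cs : List Int) (c e : Int),
    (mkFaces seq (c :: cs) e).getLastD [] = sliceI seq (lastCut (c :: cs)) e := by
  intro cs
  induction cs with
  | nil => intro c e; simp [mkFaces, lastCut]
  | cons c2 cs' ih =>
    intro c e
    simp only [mkFaces, lastCut, List.getLastD_cons]
    rw [getLastD_irrel _ _ [] (mkFaces_ne_nil seq c2 cs' e), ih c2 e]

theorem mkFaces_extend (seq : List Int) : ∀ (cs : List Int) (c e x : Int),
    (sliceI seq (lastCut (c :: cs)) e ++ [x] = sliceI seq (lastCut (c :: cs)) (e + 1)) →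
    (mkFaces seq (c :: cs) e).dropLast ++ [(mkFaces seq (c :: cs) e).getLastD [] ++ [x]] = mkFaces seq (c :: cs) (e + 1) := by
  intro cs
  induction cs with
  | nil => intro c e x H; simp only [mkFaces, lastCut] at *; simp [H]
  | cons c2 cs' ih =>
    intro c e x H
    simp only [mkFaces, lastCut, List.getLastD_cons] at H ⊢
    rw [List.dropLast_cons_of_ne_nil (mkFaces_ne_nil seq c2 cs' e),
        getLastD_irrel _ _ [] (mkFaces_ne_nil seq c2 cs' e)]
    rw [List.cons_append, ih c2 e x H]

theorem take_extend {α : Type} [Inhabited α] (l : List α) (k : Nat) (h : k < l.length) :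
    l.take k ++ [l.getD k default] = l.take (k+1) := by
  rw [List.take_add_one, List.getElem?_eq_getElem h]
  simp [List.getD_eq_getElem?_getD, List.getElem?_eq_getElem h]

theorem sliceI_extend (seq : List Int) (c e : Int) (h0 : 0 ≤ c) (hce : c ≤ e) (he : e + 1 < (seq.length : Int)) :
    sliceI seq c e ++ [seq.getD (e + 1).toNat 0] = sliceI seq c (e + 1) := by
  unfold sliceI
  rw [PySem.List.slice_toNat _ h0 (by omega), PySem.List.slice_toNat _ h0 (by omega)]
  have hk : (e+1).toNat - c.toNat = (e.toNat - c.toNat) + 1 := by omega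
  have hk2 : (e+1+1).toNat - c.toNat = ((e.toNat - c.toNat) + 1) + 1 := by omega
  rw [hk, hk2, ← take_extend (l := List.drop c.toNat seq) (k := e.toNat - c.toNat + 1) (by simp; omega)]
  congr 1
  have h3 : c.toNat + (e.toNat - c.toNat + 1) = (e+1).toNat := by omega
  simp only [List.getD_eq_getElem?_getD, List.getElem?_drop, h3]
  rfl

theorem sliceI_singleton (seq : List Int) (c : Int) (h0 : 0 ≤ c) (hc : c < (seq.length : Int)) :
    sliceI seq c c = [seq.getD c.toNat 0] := by
  unfold sliceI
  rw [PySem.List.slice_toNat _ h0 (by omega)]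
  have hk : (c+1).toNat - c.toNat = 1 := by omega
  rw [hk, ← take_extend (l := List.drop c.toNat seq) (k := 0) (by simp; omega)]
  simp [List.getD_eq_getElem?_getD, List.getElem?_drop]

theorem sliceI_getLastD (seq : List Int) (c e : Int) (h0 : 0 ≤ c) (hce : c ≤ e) (he : e < (seq.length : Int)) :
    (sliceI seq c e).getLastD 0 = seq.getD e.toNat 0 := by
  rcases eq_or_lt_of_le hce with h | h
  · subst h; rw [sliceI_singleton seq c h0 he]; rfl
  · have hext := sliceI_extend seq c (e-1) h0 (by omega) (by omega)
    have h1 : e - 1 + 1 = e := by ring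
    rw [h1] at hext
    rw [← hext, List.getLastD_concat]


def pvIcuts (w : List Int) (bset : PySem.Set Int) (m : Int) : List Int :=
  (PySem.List.pyRange 1 m 1).filter (fun i => PySem.Set.contains bset (PySem.List.pyGetD w i 0))

theorem icuts_bounds (w : List Int) (bset : PySem.Set Int) (m : Int) :
    ∀ c ∈ pvIcuts w bset m, 1 ≤ c ∧ c ≤ m - 1 := by
  intro c hc
  unfold pvIcuts at hc
  have := (List.mem_filter.mp hc).1
  have h2 := PySem.List.mem_pyRange_one.mp this
  omega

theorem hkey_seq (v : Int) (vs : List Int) (k : Nat) (h : k < vs.length + 1) :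
    PySem.List.pyGetD (v :: vs) (k : Int) 0 = ((v :: vs) ++ [v]).getD k 0 := by
  rw [PySem.List.pyGetD_natCast]
  simp only [List.getD_eq_getElem?_getD]
  rw [List.getElem?_append_left (by simp; omega)]

theorem lastCut_zero_bounds (icuts : List Int) (m : Int) (hm : 1 ≤ m)
    (hb : ∀ c ∈ icuts, 1 ≤ c ∧ c ≤ m - 1) :
    0 ≤ lastCut (0 :: icuts) ∧ lastCut (0 :: icuts) ≤ m - 1 := by
  have := lastCut_mem icuts 0
  rcases List.mem_cons.mp this with h | h
  · omega
  · have := hb _ h; omega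

theorem loopA (v : Int) (vs : List Int) (bset : PySem.Set Int) :
    ∀ (m : Nat), 1 ≤ m → m ≤ vs.length →
    (PySem.List.pyRange 1 (m : Int) 1).foldl (pvStepA (v :: vs) bset) [[v]]
      = mkFaces ((v :: vs) ++ [v]) (0 :: pvIcuts (v :: vs) bset (m : Int)) ((m : Int) - 1) := by
  intro m
  induction m with
  | zero => omega
  | succ k ih =>
    intro _ hk1
    by_cases hk : k = 0
    · subst hk
      have h1 : ((0 + 1 : Nat) : Int) = 1 := by norm_num
      rw [h1]
      rw [PySem.List.pyRange_one_eq_nil (by omega)]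
      unfold pvIcuts
      rw [PySem.List.pyRange_one_eq_nil (by omega)]
      simp only [List.foldl_nil, List.filter_nil, mkFaces]
      rw [show (1:Int) - 1 = 0 by ring]
      rw [sliceI_singleton _ 0 le_rfl (by simp; omega)]
      simp
    · have hk1' : 1 ≤ k := Nat.one_le_iff_ne_zero.mpr hk
      have hcast : ((k + 1 : Nat) : Int) = (k : Int) + 1 := by push_cast; ring
      rw [hcast]
      rw [PySem.List.pyRange_one_succ_right (by exact_mod_cast hk1')]
      rw [List.foldl_append, List.foldl_cons, List.foldl_nil]
      rw [ih hk1' (by omega)]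
      have hkey : PySem.List.pyGetD (v :: vs) (k : Int) 0 = ((v :: vs) ++ [v]).getD k 0 :=
        hkey_seq v vs k (by omega)
      have hlen : (((v :: vs) ++ [v]).length : Int) = (vs.length : Int) + 2 := by simp; ring
      have hbnd := icuts_bounds (v :: vs) bset (k : Int)
      have hlc := lastCut_zero_bounds _ (k : Int) (by exact_mod_cast hk1') hbnd
      have hext : sliceI ((v :: vs) ++ [v]) (lastCut (0 :: pvIcuts (v :: vs) bset (k : Int))) ((k : Int) - 1) ++ [PySem.List.pyGetD (v :: vs) (k : Int) 0]
          = sliceI ((v :: vs) ++ [v]) (lastCut (0 :: pvIcuts (v :: vs) bset (k : Int))) (((k : Int) - 1) + 1) := by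
        have h2 := sliceI_extend ((v :: vs) ++ [v]) (lastCut (0 :: pvIcuts (v :: vs) bset (k : Int))) ((k : Int) - 1) hlc.1 hlc.2 (by omega)
        rw [show ((k : Int) - 1 + 1) = (k : Int) by ring] at h2 ⊢
        rw [hkey, ← h2]
        norm_num
      have hmk := mkFaces_extend ((v :: vs) ++ [v]) (pvIcuts (v :: vs) bset (k : Int)) 0 ((k : Int) - 1) (PySem.List.pyGetD (v :: vs) (k : Int) 0) hext
      simp only [pvStepA]
      rw [hmk]
      rw [show ((k : Int) - 1 + 1) = (k : Int) by ring]
      by_cases hc : PySem.Set.contains bset (PySem.List.pyGetD (v :: vs) (k : Int) 0)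
      · rw [if_pos hc]
        have hicuts : pvIcuts (v :: vs) bset ((k : Int) + 1) = pvIcuts (v :: vs) bset (k : Int) ++ [(k : Int)] := by
          unfold pvIcuts
          rw [PySem.List.pyRange_one_succ_right (by exact_mod_cast hk1'), List.filter_append]
          simp only [List.filter_singleton, hc, cond_true]
        rw [hicuts, show (k : Int) + 1 - 1 = (k : Int) by ring, ← List.cons_append, mkFaces_snoc]
        congr 1
        rw [sliceI_singleton _ (k : Int) (by omega) (by omega)]
        rw [hkey]
        norm_num
      · rw [if_neg hc]
        have hicuts : pvIcuts (v :: vs) bset ((k : Int) + 1) = pvIcuts (v :: vs) bset (k : Int) := by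
          unfold pvIcuts
          rw [PySem.List.pyRange_one_succ_right (by exact_mod_cast hk1'), List.filter_append]
          have hcf : PySem.Set.contains bset (PySem.List.pyGetD (v :: vs) (k : Int) 0) = false := by
            simpa using hc
          simp only [List.filter_singleton, hcf, cond_false, List.append_nil]
        rw [hicuts, show (k : Int) + 1 - 1 = (k : Int) by ring]

theorem slice_one_negone (v : Int) (vs : List Int) :
    PySem.List.slice (v :: vs) (some 1) (some (-1)) = vs.dropLast := by
  simp [PySem.List.slice]
  rw [List.dropLast_eq_take]

theorem pyGetD_sliceI_zero_zero (v : Int) (rest : List Int) (b : Int) (hb : 0 ≤ b) :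
    PySem.List.pyGetD (sliceI (v :: rest) 0 b) 0 0 = v := by
  unfold sliceI
  rw [PySem.List.slice_zero_start, PySem.List.slice_to _ (by omega)]
  have h1 : (b+1).toNat = b.toNat + 1 := by omega
  rw [h1, List.take_succ_cons]
  simp [PySem.List.pyGetD, PySem.List.pyGet?_zero_cons]



theorem pvCycle_cons (v : Int) (vs : List Int) (hvs : vs ≠ []) (bset : PySem.Set Int) (broken : List (List Int)) :
    pvCycleA broken (v :: vs) bset = broken ++ pvCycleB (v :: vs) bset := by
  have hlen1 : 1 ≤ vs.length := List.length_pos_iff.mpr hvs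
  unfold pvCycleA pvCycleB
  rw [PySem.List.pyGet?_zero_cons]
  simp only []
  have hbound : (((v :: vs).length : Int) - 1) = (vs.length : Int) := by simp
  rw [hbound]
  rw [loopA v vs bset vs.length hlen1 le_rfl]
  -- abbreviations
  have hseqlen : (((v :: vs) ++ [v]).length : Int) = (vs.length : Int) + 2 := by simp; ring
  have hbnd := icuts_bounds (v :: vs) bset (vs.length : Int)
  have hlc := lastCut_zero_bounds (pvIcuts (v :: vs) bset (vs.length : Int)) (vs.length : Int) (by exact_mod_cast hlen1) hbnd
  -- vertices[-1] as an element of seq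
  have hgl : PySem.List.pyGetD (v :: vs) (-1) 0 = ((v :: vs) ++ [v]).getD vs.length 0 := by
    simp only [PySem.List.pyGetD, PySem.List.pyGet?_neg_one]
    rw [List.getD_eq_getElem?_getD, List.getElem?_append_left (by simp)]
    rw [List.getLast?_eq_getElem?]
    simp
  -- first extend: e = ↑vs.length - 1 → ↑vs.length
  have hH1 : sliceI ((v :: vs) ++ [v]) (lastCut (0 :: pvIcuts (v :: vs) bset (vs.length : Int))) ((vs.length : Int) - 1) ++ [PySem.List.pyGetD (v :: vs) (-1) 0]
      = sliceI ((v :: vs) ++ [v]) (lastCut (0 :: pvIcuts (v :: vs) bset (vs.length : Int))) ((vs.length : Int) - 1 + 1) := by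
    have h2 := sliceI_extend ((v :: vs) ++ [v]) (lastCut (0 :: pvIcuts (v :: vs) bset (vs.length : Int))) ((vs.length : Int) - 1) hlc.1 hlc.2 (by omega)
    rw [show ((vs.length : Int) - 1 + 1) = (vs.length : Int) by ring] at h2 ⊢
    rw [hgl, ← h2]
    norm_num
  have hext1 := mkFaces_extend ((v :: vs) ++ [v]) (pvIcuts (v :: vs) bset (vs.length : Int)) 0 ((vs.length : Int) - 1) (PySem.List.pyGetD (v :: vs) (-1) 0) hH1
  rw [hext1]
  rw [show ((vs.length : Int) - 1 + 1) = (vs.length : Int) by ring]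
  -- second extend: e = ↑vs.length → ↑vs.length + 1
  have hv2 : v = ((v :: vs) ++ [v]).getD (vs.length + 1) 0 := by
    rw [List.getD_eq_getElem?_getD, show vs.length + 1 = (v :: vs).length by simp, List.getElem?_concat_length]
    rfl
  have hH2 : sliceI ((v :: vs) ++ [v]) (lastCut (0 :: pvIcuts (v :: vs) bset (vs.length : Int))) ((vs.length : Int)) ++ [v]
      = sliceI ((v :: vs) ++ [v]) (lastCut (0 :: pvIcuts (v :: vs) bset (vs.length : Int))) ((vs.length : Int) + 1) := by
    have h2 := sliceI_extend ((v :: vs) ++ [v]) (lastCut (0 :: pvIcuts (v :: vs) bset (vs.length : Int))) ((vs.length : Int)) hlc.1 (by omega) (by omega)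
    have h3 : ((vs.length : Int) + 1).toNat = vs.length + 1 := by omega
    rw [← h2, h3, ← hv2]
  have hext2 := mkFaces_extend ((v :: vs) ++ [v]) (pvIcuts (v :: vs) bset (vs.length : Int)) 0 ((vs.length : Int)) v hH2
  rw [hext2]
  -- B side: seq is the closed walk, cuts is (0 :: icuts) ++ [n+1]
  have h4 : (v :: vs).getLast? = some (vs.getLast hvs) := by
    rw [List.getLast?_eq_some_getLast (l := v :: vs) (by simp), List.getLast_cons hvs]
  have hseq : [v] ++ PySem.List.slice (v :: vs) (some 1) (some (-1)) ++ [PySem.List.pyGetD (v :: vs) (-1) 0, v] = (v :: vs) ++ [v] := by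
    rw [slice_one_negone]
    simp only [PySem.List.pyGetD, PySem.List.pyGet?_neg_one, h4, Option.getD_some]
    have h5 : vs.dropLast ++ [vs.getLast hvs] = vs := List.dropLast_append_getLast hvs
    conv_rhs => rw [← h5]
    simp
  rw [hseq]
  have hlast : (((v :: vs) ++ [v]).length : Int) - 1 = (vs.length : Int) + 1 := by
    simp
  rw [hlast]
  have hsingl : ([(0:Int)] ++ pvIcuts (v :: vs) bset (vs.length : Int) ++ [(vs.length : Int) + 1])
      = (0 :: pvIcuts (v :: vs) bset (vs.length : Int)) ++ [(vs.length : Int) + 1] := by simp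
  rw [show (List.filter (fun i => PySem.Set.contains bset (PySem.List.pyGetD (v :: vs) i 0)) (PySem.List.pyRange 1 (vs.length : Int))) = pvIcuts (v :: vs) bset (vs.length : Int) from rfl]
  rw [hsingl, zip_map_eq_mkFaces]
  -- facts about F
  have hFne : mkFaces ((v :: vs) ++ [v]) (0 :: pvIcuts (v :: vs) bset (vs.length : Int)) ((vs.length : Int) + 1) ≠ [] :=
    mkFaces_ne_nil _ _ _ _
  have hhead : PySem.List.pyGetD (PySem.List.pyGetD (mkFaces ((v :: vs) ++ [v]) (0 :: pvIcuts (v :: vs) bset (vs.length : Int)) ((vs.length : Int) + 1)) 0 []) 0 0 = v := by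
    cases hic : pvIcuts (v :: vs) bset (vs.length : Int) with
    | nil =>
      simp only [mkFaces]
      rw [show PySem.List.pyGetD [sliceI ((v :: vs) ++ [v]) 0 ((vs.length : Int) + 1)] 0 [] = sliceI ((v :: vs) ++ [v]) 0 ((vs.length : Int) + 1) from by
        simp [PySem.List.pyGetD, PySem.List.pyGet?_zero_cons]]
      rw [List.cons_append]
      exact pyGetD_sliceI_zero_zero v (vs ++ [v]) _ (by omega)
    | cons c2 cs' =>
      simp only [mkFaces]
      rw [show PySem.List.pyGetD (sliceI ((v :: vs) ++ [v]) 0 c2 :: mkFaces ((v :: vs) ++ [v]) (c2 :: cs') ((vs.length : Int) + 1)) 0 [] = sliceI ((v :: vs) ++ [v]) 0 c2 from by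
        simp [PySem.List.pyGetD, PySem.List.pyGet?_zero_cons]]
      have hc2 : 1 ≤ c2 := (hbnd c2 (by rw [hic]; exact List.mem_cons_self ..)).1
      rw [List.cons_append]
      exact pyGetD_sliceI_zero_zero v (vs ++ [v]) _ (by omega)
  have hlastf : PySem.List.pyGetD (mkFaces ((v :: vs) ++ [v]) (0 :: pvIcuts (v :: vs) bset (vs.length : Int)) ((vs.length : Int) + 1)) (-1) []
      = (mkFaces ((v :: vs) ++ [v]) (0 :: pvIcuts (v :: vs) bset (vs.length : Int)) ((vs.length : Int) + 1)).getLastD [] := by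
    simp only [PySem.List.pyGetD, PySem.List.pyGet?_neg_one]
    rw [List.getLastD_eq_getLast?]
  have hlastlast : PySem.List.pyGetD (PySem.List.pyGetD (mkFaces ((v :: vs) ++ [v]) (0 :: pvIcuts (v :: vs) bset (vs.length : Int)) ((vs.length : Int) + 1)) (-1) []) (-1) 0 = v := by
    rw [hlastf, mkFaces_getLastD]
    simp only [PySem.List.pyGetD, PySem.List.pyGet?_neg_one]
    rw [← List.getLastD_eq_getLast?]
    rw [sliceI_getLastD _ _ _ hlc.1 (by omega) (by omega)]
    rw [show ((vs.length : Int) + 1).toNat = vs.length + 1 from by omega, ← hv2]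
  set F := mkFaces ((v :: vs) ++ [v]) (0 :: pvIcuts (v :: vs) bset (vs.length : Int)) ((vs.length : Int) + 1) with hFdef
  rw [hhead, hlastlast, hlastf]
  by_cases hb1 : F.length = 1
  · obtain ⟨f, hf⟩ := List.length_eq_one_iff.mp hb1
    rw [hf]
    simp [PySem.List.pyGetD, PySem.List.pyGet?_zero_cons]
  · have hb1' : (F.length == 1) = false := by simp [hb1]
    rw [hb1']
    simp only [Bool.false_eq_true, if_false]
    by_cases hbv : PySem.Set.contains bset v
    · rw [hbv]
      simp only [Bool.not_true, Bool.false_and, Bool.false_eq_true, if_false, Bool.and_false]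
      rw [hb1']
      simp only [Bool.false_eq_true, if_false, PySem.List.foldl_append_singleton]
    · have hbvf : PySem.Set.contains bset v = false := by simpa using hbv
      rw [hbvf]
      simp only [Bool.not_false, Bool.true_and, Bool.and_true, beq_self_eq_true, if_true]
      have hlen2 : 1 < F.length := by
        rcases F with _ | ⟨a, _ | ⟨b, t⟩⟩
        · exact absurd rfl hFne
        · exact absurd rfl hb1
        · simp
      rw [show decide (1 < F.length) = true from by simp [hlen2]]
      simp only [if_true]
      rw [List.singleton_append]
      by_cases hm : PySem.List.slice F (some 1) (some (-1)) = []
      · rw [hm]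
        simp [PySem.List.pyGetD, PySem.List.pyGet?_zero_cons]
      · obtain ⟨r, rs, hr⟩ := List.exists_cons_of_ne_nil hm
        rw [hr]
        rw [show (((F.getLastD [] ++ PySem.List.slice (PySem.List.pyGetD F 0 []) (some 1)) :: r :: rs).length == 1) = false from by simp]
        simp only [Bool.false_eq_true, if_false]
        rw [PySem.List.foldl_append_singleton]

theorem pvCycle_single (v : Int) (bset : PySem.Set Int) (broken : List (List Int)) :
    pvCycleA broken [v] bset = broken ++ pvCycleB [v] bset := by
  unfold pvCycleA pvCycleB
  rw [PySem.List.pyGet?_zero_cons]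
  simp only []
  have h0 : (([v].length : Int) - 1) = 0 := by simp
  rw [h0, PySem.List.pyRange_one_eq_nil (by omega)]
  rw [slice_one_negone]
  have hgv : PySem.List.pyGetD [v] (-1) 0 = v := by simp [PySem.List.pyGetD, PySem.List.pyGet?_neg_one]
  rw [hgv]
  simp [PySem.List.pyGetD, PySem.List.pyGet?_zero_cons, PySem.List.slice]

theorem pvCycle_eq (broken : List (List Int)) (vertices : List Int) (bset : PySem.Set Int) :
    pvCycleA broken vertices bset = broken ++ pvCycleB vertices bset := by
  match vertices with
  | [] => simp [pvCycleA, pvCycleB, PySem.List.pyGet?]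
  | [v] => exact pvCycle_single v bset broken
  | v :: v2 :: vs => exact pvCycle_cons v (v2 :: vs) (by simp) bset broken

-- ===== VERDICT (by name: the statement is the Claim_ definition above) =====
theorem break_cycles_py_spec : Claim_equal_break_cycles_py := by
  intro cycles breakpoints _ _
  show break_cycles_py cycles breakpoints = break_cycles_py_alt cycles breakpoints
  simp only [break_cycles_py, break_cycles_py_alt]
  have h : (fun (broken : List (List Int)) (p : Int × List Int) => pvCycleA broken p.2 (PySem.Set.ofList breakpoints))
      = (fun broken p => broken ++ pvCycleB p.2 (PySem.Set.ofList breakpoints)) := by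
    funext broken p; exact pvCycle_eq broken p.2 _
  rw [h]
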